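-- pv_equiv track=rewrite | github.com/3043442162/CareerRcommendation | Recommend/MyDaemo.py | genera_vector
-- ===== SOURCE A (Python) =====
-- def genera_vector(list1, list2):
--     """
--     判断list2中的词语是否在list1中出现，如果出现，则返回列表对应位置为次数，否则为0
--     :param list1:
--     :param list2:
--     :return:
--     """
--     result = [0] * 20
--     dic = {}
--     for i in range(0, len(list2)):
--         dic[list2[i]] = i
--     key = dic.keys()
--     for word in list1:
--         if word in key:
--             index = dic[word]
--             result[index] += 1
--     return result
-- ===== SOURCE B (Python) =====
-- def genera_vector(list1, list2):
--     counts = {}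
--     for w in list1:
--         counts[w] = counts.get(w, 0) + 1
--     index = {}
--     for i, w in enumerate(list2):
--         index[w] = i
--     result = [0] * 20
--     for w, i in index.items():
--         c = counts.get(w, 0)
--         if c:
--             result[i] = c
--     return result
-- ===== Notes on version B (the rewrite author's own statement) =====
-- stated objective: idiomatic
-- what changed: B builds a frequency table of list1 once and then writes each count directly at its list2 index (one assignment per distinct word), instead of A's per-occurrence membership test and increment.
import Mathlib
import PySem

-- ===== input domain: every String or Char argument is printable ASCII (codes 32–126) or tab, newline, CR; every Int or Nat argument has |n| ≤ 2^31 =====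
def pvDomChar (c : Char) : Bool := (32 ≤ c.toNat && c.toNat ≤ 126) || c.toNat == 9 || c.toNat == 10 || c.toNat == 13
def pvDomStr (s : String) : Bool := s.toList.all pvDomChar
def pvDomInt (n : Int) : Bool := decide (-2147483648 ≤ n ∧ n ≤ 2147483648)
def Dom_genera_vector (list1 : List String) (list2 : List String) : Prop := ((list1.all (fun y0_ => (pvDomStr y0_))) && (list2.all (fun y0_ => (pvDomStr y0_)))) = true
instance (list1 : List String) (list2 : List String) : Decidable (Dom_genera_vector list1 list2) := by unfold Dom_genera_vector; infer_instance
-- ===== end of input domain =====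

-- B replaces A's per-occurrence membership-test-and-increment loop by a frequency table of
-- list1 written once per distinct list2 word (idiomatic counter + direct assignment).


-- ===== PORT A =====
def genera_vector (list1 : List String) (list2 : List String) : List Int :=
  let result : List Int := List.replicate 20 0
  let dic : PySem.Dict String Int :=
    (PySem.List.pyRange 0 (PySem.List.len list2) 1).foldl
      (fun d i => d.insert (PySem.List.pyGetD list2 i "") i) PySem.Dict.empty
  list1.foldl
    (fun res word =>
      if dic.contains word then
        let index := dic.getD word 0
        PySem.List.pySetD res index (PySem.List.pyGetD res index 0 + 1)
      else res) result

-- ===== PORT B =====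
def genera_vector_alt (list1 : List String) (list2 : List String) : List Int :=
  let counts : PySem.Dict String Int :=
    list1.foldl (fun d w => d.insert w (d.getD w 0 + 1)) PySem.Dict.empty
  let index : PySem.Dict String Int :=
    (PySem.List.enumerate list2 0).foldl (fun d p => d.insert p.2 p.1) PySem.Dict.empty
  let result : List Int := List.replicate 20 0
  index.items.foldl
    (fun res p =>
      let c := counts.getD p.1 0
      if c ≠ 0 then PySem.List.pySetD res p.2 c else res) result

-- ===== PRECONDITION & SPEC =====
-- Pre_ excludes exactly the inputs on which A raises IndexError: a word of list1 occurring in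
-- list2 at a position ≥ 20 (result has only 20 slots). B raises there as well.
def Pre_genera_vector (list1 : List String) (list2 : List String) : Prop :=
  ∀ w ∈ list2.drop 20, w ∉ list1
instance (list1 : List String) (list2 : List String) : Decidable (Pre_genera_vector list1 list2) := by unfold Pre_genera_vector; infer_instance
def pvWitness_genera_vector : List String × List String := (["a", "a", "b"], ["a", "c"])

def Spec_genera_vector (list1 : List String) (list2 : List String) (out : List Int) : Prop := out = genera_vector_alt list1 list2
instance (list1 : List String) (list2 : List String) (out : List Int) : Decidable (Spec_genera_vector list1 list2 out) := by unfold Spec_genera_vector; infer_instance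

-- ===== CLAIM (what is proved, stated in full; the proofs are below) =====
def Claim_equal_genera_vector : Prop := ∀ (list1 : List String) (list2 : List String), Dom_genera_vector list1 list2 → Pre_genera_vector list1 list2 → Spec_genera_vector list1 list2 (genera_vector list1 list2)

-- ===== LEMMAS AND PROOFS =====

-- the list2-index dictionary both programs build (A via range(len), B via enumerate)
def dicOf (list2 : List String) : PySem.Dict String Int :=
  (PySem.List.pyRange 0 (PySem.List.len list2) 1).foldl
    (fun d i => d.insert (PySem.List.pyGetD list2 i "") i) PySem.Dict.empty

def stepA (dic : PySem.Dict String Int) (res : List Int) (word : String) : List Int :=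
  if dic.contains word then
    let index := dic.getD word 0
    PySem.List.pySetD res index (PySem.List.pyGetD res index 0 + 1)
  else res

def stepB (counts : PySem.Dict String Int) (res : List Int) (p : String × Int) : List Int :=
  let c := counts.getD p.1 0
  if c ≠ 0 then PySem.List.pySetD res p.2 c else res

theorem genera_vector_eq_fold (list1 list2 : List String) :
    genera_vector list1 list2 = list1.foldl (stepA (dicOf list2)) (List.replicate 20 0) := rfl

theorem genera_vector_alt_eq_fold (list1 list2 : List String) :
    genera_vector_alt list1 list2 =
      (dicOf list2).items.foldl (stepB (PySem.Dict.counter list1)) (List.replicate 20 0) := by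
  show (((PySem.List.enumerate list2 0).foldl (fun d p => d.insert p.2 p.1) PySem.Dict.empty).items.foldl
      (stepB (list1.foldl (fun d w => d.insert w (d.getD w 0 + 1)) PySem.Dict.empty))
      (List.replicate 20 0)) = _
  rw [PySem.Dict.foldl_insert_getD_add_one_eq_counter,
    PySem.List.enumerate_eq_map_pyRange list2 "", List.foldl_map]
  rfl

-- every item of the dictionary is (list2[i], i) for a valid index i
theorem dicOf_items_inv_gen (list2 : List String) (l : List Int) (d : PySem.Dict String Int)
    (hd : ∀ p ∈ d.items, PySem.List.pyGetD list2 p.2 "" = p.1 ∧ 0 ≤ p.2 ∧ p.2 < (list2.length : Int))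
    (hl : ∀ i ∈ l, 0 ≤ i ∧ i < (list2.length : Int)) :
    ∀ p ∈ (l.foldl (fun d i => d.insert (PySem.List.pyGetD list2 i "") i) d).items,
      PySem.List.pyGetD list2 p.2 "" = p.1 ∧ 0 ≤ p.2 ∧ p.2 < (list2.length : Int) := by
  induction l generalizing d with
  | nil => exact hd
  | cons i l ih =>
    intro p hp
    refine ih _ ?_ (fun j hj => hl j (List.mem_cons_of_mem _ hj)) p hp
    intro q hq
    rcases (PySem.Dict.mem_items_insert d _ _ q).1 hq with h | ⟨h, _⟩
    · subst h
      exact ⟨rfl, (hl i (List.mem_cons_self ..)).1, (hl i (List.mem_cons_self ..)).2⟩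
    · exact hd q h

theorem dicOf_items_inv (list2 : List String) :
    ∀ p ∈ (dicOf list2).items,
      PySem.List.pyGetD list2 p.2 "" = p.1 ∧ 0 ≤ p.2 ∧ p.2 < (list2.length : Int) := by
  refine dicOf_items_inv_gen list2 _ _ (by simp [PySem.Dict.empty]) ?_
  intro i hi
  have := PySem.List.mem_pyRange_one.1 hi
  simpa [PySem.List.len] using this

theorem dicOf_keys_nodup (list2 : List String) : (dicOf list2).keys.Nodup :=
  PySem.Dict.nodup_keys_foldl_insert_key _ (fun i => PySem.List.pyGetD list2 i "")
    (fun _ i => i) _ PySem.Dict.nodup_keys_empty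

theorem dicOf_items_nodup (list2 : List String) : (dicOf list2).items.Nodup :=
  List.Nodup.of_map Prod.fst (dicOf_keys_nodup list2)

theorem dicOf_snd_inj (list2 : List String) {p q : String × Int}
    (hp : p ∈ (dicOf list2).items) (hq : q ∈ (dicOf list2).items) (h : p.2 = q.2) : p = q := by
  have h1 := dicOf_items_inv list2 p hp
  have h2 := dicOf_items_inv list2 q hq
  have : p.1 = q.1 := by rw [← h1.1, ← h2.1, h]
  exact Prod.ext this h

-- a matched word's index is < 20 under Pre_
theorem idx_lt_20 {list1 list2 : List String} (hpre : Pre_genera_vector list1 list2)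
    {w : String} {i : Int} (hi : (w, i) ∈ (dicOf list2).items) (hw : w ∈ list1) : i < 20 := by
  have h := dicOf_items_inv list2 _ hi
  by_contra hlt
  push_neg at hlt
  have h20 : (20 : Int) ≤ i := hlt
  have hn : i.toNat < list2.length := by omega
  have h1 : PySem.List.pyGetD list2 i "" = w := h.1
  have hwv : w = list2[i.toNat] := by
    rw [← h1, PySem.List.pyGetD_eq_getElem list2 "" h.2.1 (by exact_mod_cast h.2.2)]
  have hmem : w ∈ list2.drop 20 := by
    have hlen : i.toNat - 20 < (list2.drop 20).length := by simp [List.length_drop]; omega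
    have : (list2.drop 20)[i.toNat - 20] = list2[i.toNat] := by
      rw [List.getElem_drop]; congr 1; omega
    rw [hwv, ← this]
    exact List.getElem_mem hlen
  exact hpre w hmem hw

theorem foldlA_length (dic : PySem.Dict String Int) :
    ∀ (l : List String) (res : List Int), (l.foldl (stepA dic) res).length = res.length := by
  intro l
  induction l with
  | nil => intro res; rfl
  | cons w l ih =>
    intro res
    rw [List.foldl_cons, ih]
    simp only [stepA]
    split <;> simp [PySem.List.length_pySetD]

theorem foldlB_length (counts : PySem.Dict String Int) :
    ∀ (ps : List (String × Int)) (res : List Int),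
      (ps.foldl (stepB counts) res).length = res.length := by
  intro ps
  induction ps with
  | nil => intro res; rfl
  | cons p ps ih =>
    intro res
    rw [List.foldl_cons, ih]
    simp only [stepB]
    split <;> simp [PySem.List.length_pySetD]

theorem foldlA_point (dic : PySem.Dict String Int) (j : Nat) (hj : j < 20) :
    ∀ (l : List String) (res : List Int), res.length = 20 →
      (∀ w ∈ l, dic.contains w = true → 0 ≤ dic.getD w 0 ∧ dic.getD w 0 < 20) →
      PySem.List.pyGetD (l.foldl (stepA dic) res) (j : Int) 0
        = PySem.List.pyGetD res (j : Int) 0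
          + ((l.filter (fun w => dic.contains w && (dic.getD w 0 == (j : Int)))).length : Int) := by
  intro l
  induction l with
  | nil => intro res _ _; simp
  | cons w l ih =>
    intro res hlen hb
    rw [List.foldl_cons]
    by_cases hc : dic.contains w = true
    · have hbw := hb w (List.mem_cons_self ..) hc
      have hstep : stepA dic res w
          = PySem.List.pySetD res (dic.getD w 0) (PySem.List.pyGetD res (dic.getD w 0) 0 + 1) := by
        simp only [stepA, hc, if_true]
      set i := dic.getD w 0 with hi
      have hn : i = ((i.toNat : Nat) : Int) := by omega
      have hnlt : i.toNat < res.length := by omega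
      rw [hstep, ih _ (by rw [PySem.List.length_pySetD]; exact hlen)
        (fun v hv => hb v (List.mem_cons_of_mem _ hv))]
      have hget : PySem.List.pyGetD (PySem.List.pySetD res i (PySem.List.pyGetD res i 0 + 1)) (j : Int) 0
          = if j = i.toNat then PySem.List.pyGetD res ((i.toNat : Nat) : Int) 0 + 1
            else PySem.List.pyGetD res (j : Int) 0 := by
        conv_lhs => rw [hn]
        exact PySem.List.pyGetD_pySetD_natCast res i.toNat j _ 0 hnlt
      rw [hget, List.filter_cons]
      by_cases hij : j = i.toNat
      · have hpt : (dic.contains w && (dic.getD w 0 == (j : Int))) = true := by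
          rw [hc, ← hi]; simp; omega
        rw [if_pos hij, if_pos hpt, ← hij]
        simp only [List.length_cons]
        push_cast
        ring
      · have hpf : (dic.contains w && (dic.getD w 0 == (j : Int))) = false := by
          rw [hc, ← hi]; simp; omega
        rw [if_neg hij, if_neg (by simp [hpf])]
    · have hcf : dic.contains w = false := by revert hc; cases dic.contains w <;> simp
      have hstep : stepA dic res w = res := by simp [stepA, hcf]
      rw [hstep, ih _ hlen (fun v hv => hb v (List.mem_cons_of_mem _ hv)), List.filter_cons]
      rw [if_neg (by simp [hcf])]

theorem foldlB_untouched (counts : PySem.Dict String Int) (j : Nat) (hj : j < 20) :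
    ∀ (ps : List (String × Int)) (res : List Int),
      (∀ p ∈ ps, counts.getD p.1 0 ≠ 0 → p.2 ≠ (j : Int) ∧ 0 ≤ p.2 ∧ p.2 < 20) →
      res.length = 20 →
      PySem.List.pyGetD (ps.foldl (stepB counts) res) (j : Int) 0
        = PySem.List.pyGetD res (j : Int) 0 := by
  intro ps
  induction ps with
  | nil => intro res _ _; rfl
  | cons p ps ih =>
    intro res hb hlen
    rw [List.foldl_cons]
    by_cases hc : counts.getD p.1 0 ≠ 0
    · have hbp := hb p (List.mem_cons_self ..) hc
      have hn : p.2 = ((p.2.toNat : Nat) : Int) := by omega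
      have hnlt : p.2.toNat < res.length := by omega
      have hstep : stepB counts res p = PySem.List.pySetD res p.2 (counts.getD p.1 0) := by
        simp only [stepB]; rw [if_pos hc]
      rw [hstep, ih _ (fun q hq => hb q (List.mem_cons_of_mem _ hq))
        (by rw [PySem.List.length_pySetD]; exact hlen)]
      conv_lhs => rw [hn]
      rw [PySem.List.pyGetD_pySetD_natCast res p.2.toNat j _ 0 hnlt]
      rw [if_neg (by omega)]
    · have hstep : stepB counts res p = res := by simp only [stepB]; rw [if_neg hc]
      rw [hstep, ih _ (fun q hq => hb q (List.mem_cons_of_mem _ hq)) hlen]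

theorem foldlB_point (counts : PySem.Dict String Int) (j : Nat) (hj : j < 20) :
    ∀ (ps : List (String × Int)) (res : List Int) (q : String × Int),
      ps.Nodup →
      (∀ p ∈ ps, ∀ p' ∈ ps, p.2 = p'.2 → p = p') →
      (∀ p ∈ ps, counts.getD p.1 0 ≠ 0 → 0 ≤ p.2 ∧ p.2 < 20) →
      res.length = 20 →
      q ∈ ps → q.2 = (j : Int) → counts.getD q.1 0 ≠ 0 →
      PySem.List.pyGetD (ps.foldl (stepB counts) res) (j : Int) 0 = counts.getD q.1 0 := by
  intro ps
  induction ps with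
  | nil => intro res q _ _ _ _ hq; exact absurd hq (List.not_mem_nil)
  | cons p ps ih =>
    intro res q hnd hinj hb hlen hq hqj hqc
    rw [List.foldl_cons]
    rcases List.mem_cons.1 hq with hpq | hq'
    · subst hpq
      have hbq := hb q (List.mem_cons_self ..) hqc
      have hn : q.2 = ((q.2.toNat : Nat) : Int) := by omega
      have hnlt : q.2.toNat < res.length := by omega
      have hstep : stepB counts res q = PySem.List.pySetD res q.2 (counts.getD q.1 0) := by
        simp only [stepB]; rw [if_pos hqc]
      rw [hstep]
      rw [foldlB_untouched counts j hj ps _ ?_ (by rw [PySem.List.length_pySetD]; exact hlen)]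
      · conv_lhs => rw [hn]
        rw [PySem.List.pyGetD_pySetD_natCast res q.2.toNat j _ 0 hnlt]
        rw [if_pos (by omega)]
      · intro r hr hrc
        refine ⟨?_, hb r (List.mem_cons_of_mem _ hr) hrc⟩
        intro hrj
        have : r = q := hinj r (List.mem_cons_of_mem _ hr) q (List.mem_cons_self ..) (by omega)
        exact (List.nodup_cons.1 hnd).1 (this ▸ hr)
    · have hpq : p ≠ q := fun h => (List.nodup_cons.1 hnd).1 (h ▸ hq')
      have hres' : ∀ res' : List Int, res'.length = 20 →
          PySem.List.pyGetD (ps.foldl (stepB counts) res') (j : Int) 0 = counts.getD q.1 0 :=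
        fun res' hlen' => ih res' q (List.nodup_cons.1 hnd).2
          (fun a ha a' ha' => hinj a (List.mem_cons_of_mem _ ha) a' (List.mem_cons_of_mem _ ha'))
          (fun a ha => hb a (List.mem_cons_of_mem _ ha)) hlen' hq' hqj hqc
      by_cases hc : counts.getD p.1 0 ≠ 0
      · have hbp := hb p (List.mem_cons_self ..) hc
        have hstep : stepB counts res p = PySem.List.pySetD res p.2 (counts.getD p.1 0) := by
          simp only [stepB]; rw [if_pos hc]
        rw [hstep]
        exact hres' _ (by rw [PySem.List.length_pySetD]; exact hlen)
      · have hstep : stepB counts res p = res := by simp only [stepB]; rw [if_neg hc]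
        rw [hstep]; exact hres' _ hlen

-- ===== VERDICT (by name: the statement is the Claim_ definition above) =====
theorem genera_vector_spec : Claim_equal_genera_vector := by
  intro list1 list2 _ hpre
  unfold Spec_genera_vector
  rw [genera_vector_eq_fold, genera_vector_alt_eq_fold]
  set dic := dicOf list2 with hdic
  set counts := PySem.Dict.counter list1 with hcounts
  -- counts lookup = occurrence count in list1
  have hcnt : ∀ w, counts.getD w 0 = (list1.count w : Int) := fun w =>
    PySem.Dict.getD_counter list1 w
  have hcnt_ne : ∀ w, counts.getD w 0 ≠ 0 ↔ w ∈ list1 := by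
    intro w
    rw [hcnt]
    constructor
    · intro h; exact List.count_pos_iff.1 (by omega)
    · intro h
      have : 0 < List.count w list1 := List.count_pos_iff.2 h
      omega
  -- bounds for the A-side fold
  have hboundA : ∀ w ∈ list1, dic.contains w = true → 0 ≤ dic.getD w 0 ∧ dic.getD w 0 < 20 := by
    intro w hw hc
    rw [PySem.Dict.contains_eq_isSome_get?] at hc
    obtain ⟨v, hv⟩ := Option.isSome_iff_exists.1 hc
    have hitem := PySem.Dict.mem_items_of_get?_eq_some dic hv
    have hinv := dicOf_items_inv list2 _ hitem
    have hlt := idx_lt_20 hpre hitem hw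
    have hgd : dic.getD w 0 = v := by rw [PySem.Dict.getD_eq_get?_getD, hv]; rfl
    rw [hgd]
    exact ⟨hinv.2.1, hlt⟩
  -- bounds for the B-side fold
  have hboundB : ∀ p ∈ dic.items, counts.getD p.1 0 ≠ 0 → 0 ≤ p.2 ∧ p.2 < 20 := by
    intro p hp hc
    have hinv := dicOf_items_inv list2 _ hp
    exact ⟨hinv.2.1, idx_lt_20 hpre (by exact hp) ((hcnt_ne p.1).1 hc)⟩
  have hlenA : (list1.foldl (stepA dic) (List.replicate 20 0)).length = 20 := by
    rw [foldlA_length]; simp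
  have hlenB : (dic.items.foldl (stepB counts) (List.replicate 20 0)).length = 20 := by
    rw [foldlB_length]; simp
  apply List.ext_getElem (by rw [hlenA, hlenB])
  intro j hjA _
  have hj : j < 20 := by omega
  have toPy : ∀ (xs : List Int) (hx : xs.length = 20) (hjx : j < xs.length), xs[j] = PySem.List.pyGetD xs (j : Int) 0 := by
    intro xs hx hjx
    rw [PySem.List.pyGetD_natCast, List.getD_eq_getElem xs 0 hjx]
  rw [toPy _ hlenA (by omega), toPy _ hlenB (by omega)]
  have hbase : PySem.List.pyGetD (List.replicate 20 (0 : Int)) (j : Int) 0 = 0 := by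
    rw [PySem.List.pyGetD_natCast, List.getD_replicate _ hj]
  rw [foldlA_point dic j hj list1 _ (by simp) hboundA, hbase, zero_add]
  by_cases hex : ∃ p ∈ dic.items, p.2 = (j : Int) ∧ counts.getD p.1 0 ≠ 0
  · obtain ⟨q, hqmem, hqj, hqc⟩ := hex
    rw [foldlB_point counts j hj dic.items _ q (dicOf_items_nodup list2)
      (fun p hp p' hp' h => dicOf_snd_inj list2 hp hp' h) hboundB (by simp) hqmem hqj hqc]
    have hfc : list1.filter (fun w => dic.contains w && (dic.getD w 0 == (j : Int)))
        = list1.filter (fun w => w == q.1) := by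
      apply List.filter_congr
      intro w _
      by_cases hwq : w = q.1
      · have hq1 : dic.get? q.1 = some q.2 :=
          PySem.Dict.get?_of_mem_items dic (by simpa using hqmem) (dicOf_keys_nodup list2)
        have hc : dic.contains w = true := by
          rw [hwq, PySem.Dict.contains_eq_isSome_get?, hq1]; rfl
        have hgd : dic.getD w 0 = (j : Int) := by
          rw [hwq, PySem.Dict.getD_eq_get?_getD, hq1, hqj]; rfl
        rw [hc, hgd]
        simp [hwq]
      · have hrhs : (w == q.1) = false := by simp [hwq]
        rw [hrhs]
        by_contra hlhs
        simp only [Bool.not_eq_false, Bool.and_eq_true, beq_iff_eq] at hlhs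
        obtain ⟨hc, hgd⟩ := hlhs
        rw [PySem.Dict.contains_eq_isSome_get?] at hc
        obtain ⟨v, hv⟩ := Option.isSome_iff_exists.1 hc
        have hgv : dic.getD w 0 = v := by rw [PySem.Dict.getD_eq_get?_getD, hv]; rfl
        have hitem := PySem.Dict.mem_items_of_get?_eq_some dic hv
        have hvj : v = (j : Int) := by rw [← hgv, hgd]
        have : (w, v) = q := dicOf_snd_inj list2 hitem hqmem
          (by show v = q.2; rw [hvj, hqj])
        exact hwq (by rw [← this])
    rw [hfc, ← List.count_eq_length_filter, hcnt q.1]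
  · push_neg at hex
    rw [foldlB_untouched counts j hj dic.items _ ?_ (by simp), hbase]
    · have : list1.filter (fun w => dic.contains w && (dic.getD w 0 == (j : Int))) = [] := by
        rw [List.filter_eq_nil_iff]
        intro w hw hpred
        simp only [Bool.and_eq_true, beq_iff_eq] at hpred
        obtain ⟨hc, hgd⟩ := hpred
        rw [PySem.Dict.contains_eq_isSome_get?] at hc
        obtain ⟨v, hv⟩ := Option.isSome_iff_exists.1 hc
        have hgv : dic.getD w 0 = v := by rw [PySem.Dict.getD_eq_get?_getD, hv]; rfl
        have hitem := PySem.Dict.mem_items_of_get?_eq_some dic hv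
        exact ((hcnt_ne w).2 hw)
          (hex (w, v) hitem (by show v = (j : Int); rw [← hgv, hgd]))
      rw [this]; rfl
    · intro p hp hc
      exact ⟨fun h => hc (hex p hp h), hboundB p hp hc⟩
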